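-- pv_equiv track=rewrite | github.com/WaterMelonKnight/turboquant-java-runtime | scripts/plot_benchmarks.py | _unique_labels
-- ===== SOURCE A (Python) =====
-- from collections import defaultdict
--
-- def _run_label(row):
--     """Derive a short human-readable label from a CSV row."""
--     model = row.get("model_basename", "")
--     quant = row.get("quant_hint", "")
--     ctx   = row.get("context_tokens", "")
--     gen   = row.get("requested_max_new_tokens", "")
--
--     # Shorten the model name: qwen2.5-0.5b-instruct -> qwen25_05b
--     name = model.lower()
--     for sub in [".gguf", "-instruct", "-chat", "-base", "-" + quant.lower()]:
--         name = name.replace(sub, "")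
--     name = name.replace(".", "").replace("-", "_")
--
--     parts = [p for p in [name, quant, "ctx" + ctx, "gen" + gen] if p]
--     return "_".join(parts)
--
-- def _unique_labels(rows):
--     """Return per-row labels, appending (#2), (#3) ... for duplicates."""
--     raw   = [_run_label(r) for r in rows]
--     count = defaultdict(int)
--     seen  = defaultdict(int)
--     for lbl in raw:
--         count[lbl] += 1
--
--     result = []
--     for lbl in raw:
--         if count[lbl] > 1:
--             seen[lbl] += 1
--             result.append("{} (#{})".format(lbl, seen[lbl]))
--         else:
--             result.append(lbl)
--     return result
-- ===== SOURCE B (Python) =====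
-- def _run_label(row):
--     """Derive a short human-readable label from a CSV row."""
--     model = row.get("model_basename", "")
--     quant = row.get("quant_hint", "")
--     ctx   = row.get("context_tokens", "")
--     gen   = row.get("requested_max_new_tokens", "")
--
--     name = model.lower()
--     for sub in [".gguf", "-instruct", "-chat", "-base", "-" + quant.lower()]:
--         name = name.replace(sub, "")
--     name = name.replace(".", "").replace("-", "_")
--
--     parts = [p for p in [name, quant, "ctx" + ctx, "gen" + gen] if p]
--     return "_".join(parts)
--
-- def _unique_labels(rows):
--     """Group label occurrences by position, then scatter the (suffixed) labels back by index."""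
--     raw = [_run_label(r) for r in rows]
--     groups = {}
--     for pos, lbl in enumerate(raw):
--         groups.setdefault(lbl, []).append(pos)
--     result = [""] * len(raw)
--     for lbl, positions in groups.items():
--         if len(positions) == 1:
--             result[positions[0]] = lbl
--         else:
--             for i, pos in enumerate(positions):
--                 result[pos] = "{} (#{})".format(lbl, i + 1)
--     return result
-- ===== Notes on version B (the rewrite author's own statement) =====
-- stated objective: alternative
-- what changed: Replaces A's count-pass plus a second sequential pass with a running 'seen' counter by a single group-by pass building label->positions, then scattering bare or numbered labels back into a preallocated result by index.
import Mathlib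
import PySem

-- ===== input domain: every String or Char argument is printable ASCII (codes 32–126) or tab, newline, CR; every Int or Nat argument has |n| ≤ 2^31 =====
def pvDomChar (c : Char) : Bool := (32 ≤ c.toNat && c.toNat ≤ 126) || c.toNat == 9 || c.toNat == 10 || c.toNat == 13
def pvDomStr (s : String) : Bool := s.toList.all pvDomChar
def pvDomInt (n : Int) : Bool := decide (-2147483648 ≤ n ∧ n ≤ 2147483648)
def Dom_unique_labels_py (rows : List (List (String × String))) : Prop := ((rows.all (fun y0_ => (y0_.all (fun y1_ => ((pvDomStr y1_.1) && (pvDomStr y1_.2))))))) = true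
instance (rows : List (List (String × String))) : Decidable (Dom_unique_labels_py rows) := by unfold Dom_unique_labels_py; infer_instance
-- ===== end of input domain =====

-- B replaces A's count pass + sequential suffixing pass by a single group-by-positions pass
-- followed by an index scatter into a preallocated result (alternative decomposition, same cost).

-- ===== PORT A =====
-- shared helper: port of _run_label (identical in Source A and Source B)
def runLabel (row : List (String × String)) : String :=
  let d : PySem.Dict String String := PySem.Dict.mk row
  let model := PySem.Dict.getD d "model_basename" ""
  let quant := PySem.Dict.getD d "quant_hint" ""
  let ctx := PySem.Dict.getD d "context_tokens" ""
  let gen := PySem.Dict.getD d "requested_max_new_tokens" ""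
  let name := PySem.Str.lower model
  let name := [".gguf", "-instruct", "-chat", "-base", "-" ++ PySem.Str.lower quant].foldl
    (fun n sub => PySem.Str.replace n sub "") name
  let name := PySem.Str.replace (PySem.Str.replace name "." "") "-" "_"
  let parts := [name, quant, "ctx" ++ ctx, "gen" ++ gen].filter (fun p => p != "")
  PySem.Str.join "_" parts

-- loop body of A's second pass ('if count[lbl] > 1: seen[lbl] += 1; append suffixed; else append bare')
def stepA (c : PySem.Dict String Int) (st : PySem.Dict String Int × List String) (lbl : String) :
    PySem.Dict String Int × List String :=
  if PySem.Dict.getD c lbl 0 > 1 then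
    let seen' := PySem.Dict.modify st.1 lbl 0 (· + 1)
    (seen', st.2 ++ [lbl ++ " (#" ++ PySem.Int.toStr (PySem.Dict.getD seen' lbl 0) ++ ")"])
  else
    (st.1, st.2 ++ [lbl])

def unique_labels_py (rows : List (List (String × String))) : List String :=
  let raw := rows.map runLabel
  let count := raw.foldl (fun d lbl => PySem.Dict.modify d lbl 0 (· + 1))
    (PySem.Dict.empty : PySem.Dict String Int)
  (raw.foldl (stepA count) (PySem.Dict.empty, [])).2

-- ===== PORT B =====
-- hand port of Python list assignment `result[pos] = v`; exact for 0 ≤ pos < len(result),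
-- the only case reached here (positions come from enumerate of the same-length list)
def pySetAt (res : List String) (i : Int) (v : String) : List String := res.set i.toNat v

-- loop body of B's scatter pass (one group: a bare label, or numbered labels at each position)
def fillStep (res : List String) (g : String × List Int) : List String :=
  match g.2 with
  | [p] => pySetAt res p g.1
  | ps => (PySem.List.enumerate ps 0).foldl
      (fun r ip => pySetAt r ip.2 (g.1 ++ " (#" ++ PySem.Int.toStr (ip.1 + 1) ++ ")")) res

def unique_labels_py_alt (rows : List (List (String × String))) : List String :=
  let raw := rows.map runLabel
  let groups : PySem.Dict String (List Int) :=
    (PySem.List.enumerate raw 0).foldl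
      (fun d pl => PySem.Dict.modify d pl.2 [] (fun ps => ps ++ [pl.1])) PySem.Dict.empty
  let result0 := PySem.List.pyRepeat [""] (PySem.List.len raw)
  (PySem.Dict.items groups).foldl fillStep result0

-- ===== PRECONDITION & SPEC =====
def Spec_unique_labels_py (rows : List (List (String × String))) (out : List String) : Prop := out = unique_labels_py_alt rows
instance (rows : List (List (String × String))) (out : List String) : Decidable (Spec_unique_labels_py rows out) := by unfold Spec_unique_labels_py; infer_instance

-- ===== CLAIM (what is proved, stated in full; the proofs are below) =====
def Claim_equal_unique_labels_py : Prop := ∀ (rows : List (List (String × String))), Dom_unique_labels_py rows → Spec_unique_labels_py rows (unique_labels_py rows)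

-- ===== LEMMAS AND PROOFS =====

-- canonical pointwise description both ports are reduced to
def canonAux (full done rest : List String) : List String :=
  match rest with
  | [] => []
  | l :: rest' =>
    (if 1 < full.count l then l ++ " (#" ++ PySem.Int.toStr ((done.count l : Int) + 1) ++ ")" else l)
      :: canonAux full (done ++ [l]) rest'

def outAt (full : List String) (i : Nat) : String :=
  let k := full.getD i ""
  if 1 < full.count k then k ++ " (#" ++ PySem.Int.toStr (((full.take i).count k : Int) + 1) ++ ")" else k

def posOf (raw : List String) (k : String) : List Int :=
  ((PySem.List.enumerate raw 0).filter (fun p => p.2 == k)).map (fun p => p.1)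

def writeAll (l : List (Int × String)) (res : List String) : List String :=
  l.foldl (fun r p => pySetAt r p.1 p.2) res

def writesOf (g : String × List Int) : List (Int × String) :=
  match g.2 with
  | [p] => [(p, g.1)]
  | ps => (PySem.List.enumerate ps 0).map (fun ip => (ip.2, g.1 ++ " (#" ++ PySem.Int.toStr (ip.1 + 1) ++ ")"))

theorem canonAux_length (full : List String) :
    ∀ (rest done : List String), (canonAux full done rest).length = rest.length := by
  intro rest
  induction rest with
  | nil => intro done; simp [canonAux]
  | cons l t ih => intro done; simp [canonAux, ih]

theorem canonAux_get? (full : List String) :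
    ∀ (rest done : List String) (j : Nat), full = done ++ rest → j < rest.length →
    (canonAux full done rest)[j]? = some (outAt full (done.length + j)) := by
  intro rest
  induction rest with
  | nil => intro done j _ hj; simp at hj
  | cons l t ih =>
    intro done j hfull hj
    cases j with
    | zero =>
      have hk : full.getD (done.length + 0) "" = l := by
        subst hfull
        simp
      have ht : full.take (done.length + 0) = done := by
        subst hfull
        simp
      simp only [canonAux, List.getElem?_cons_zero, outAt, hk, ht]
    | succ j' =>
      have hfull' : full = (done ++ [l]) ++ t := by simpa using hfull
      have := ih (done ++ [l]) j' hfull' (by simpa using Nat.lt_of_succ_lt_succ hj)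
      simp only [canonAux, List.getElem?_cons_succ]
      rw [this]
      congr 2
      simp
      omega

theorem foldA (full : List String) (c : PySem.Dict String Int)
    (hc : ∀ l, PySem.Dict.getD c l 0 = (full.count l : Int)) :
    ∀ (rest done : List String) (s : PySem.Dict String Int) (acc : List String),
    (∀ lbl, 1 < full.count lbl → PySem.Dict.getD s lbl 0 = (done.count lbl : Int)) →
    (rest.foldl (stepA c) (s, acc)).2 = acc ++ canonAux full done rest := by
  intro rest
  induction rest with
  | nil => intro done s acc _; simp [canonAux]
  | cons l t ih =>
    intro done s acc hinv
    rw [List.foldl_cons]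
    by_cases hcl : 1 < full.count l
    · have hcond : PySem.Dict.getD c l 0 > 1 := by rw [hc]; exact_mod_cast hcl
      have hseen : PySem.Dict.getD (PySem.Dict.modify s l 0 (· + 1)) l 0 = (done.count l : Int) + 1 := by
        rw [PySem.Dict.getD_modify_self, hinv l hcl]
      have hstep : stepA c (s, acc) l =
          (PySem.Dict.modify s l 0 (· + 1),
           acc ++ [l ++ " (#" ++ PySem.Int.toStr ((done.count l : Int) + 1) ++ ")"]) := by
        simp only [stepA, if_pos hcond, hseen]
      rw [hstep, ih (done ++ [l]) _ _ ?_]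
      · simp [canonAux, if_pos hcl]
      · intro lbl hlbl
        by_cases he : lbl = l
        · subst he
          rw [PySem.Dict.getD_modify_self, hinv lbl hlbl]
          simp [List.count_append]
        · rw [PySem.Dict.getD_modify_of_ne _ _ _ he]
          rw [hinv lbl hlbl]
          have he' : ¬ l = lbl := fun h => he h.symm
          simp [List.count_append, he']
    · have hcond : ¬ PySem.Dict.getD c l 0 > 1 := by rw [hc]; exact_mod_cast hcl
      have hstep : stepA c (s, acc) l = (s, acc ++ [l]) := by
        simp only [stepA, if_neg hcond]
      rw [hstep, ih (done ++ [l]) _ _ ?_]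
      · simp [canonAux, if_neg hcl]
      · intro lbl hlbl
        have he : lbl ≠ l := by rintro rfl; exact hcl hlbl
        have he' : ¬ l = lbl := fun h => he h.symm
        rw [hinv lbl hlbl]
        simp [List.count_append, he']

theorem A_eq_canon (rows : List (List (String × String))) :
    unique_labels_py rows = canonAux (rows.map runLabel) [] (rows.map runLabel) := by
  have hc : ∀ l, PySem.Dict.getD ((rows.map runLabel).foldl
      (fun d lbl => PySem.Dict.modify d lbl 0 (· + 1)) PySem.Dict.empty) l 0
      = ((rows.map runLabel).count l : Int) := by
    intro l
    rw [PySem.Dict.getD_foldl_modify_add_one]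
    simp
  have hinv : ∀ lbl, 1 < (rows.map runLabel).count lbl →
      PySem.Dict.getD (PySem.Dict.empty : PySem.Dict String Int) lbl 0 = (([] : List String).count lbl : Int) := by
    intro lbl _; simp [PySem.Dict.getD_empty]
  exact foldA _ _ hc (rows.map runLabel) [] _ [] hinv

theorem writeAll_length (l : List (Int × String)) : ∀ res, (writeAll l res).length = res.length := by
  induction l with
  | nil => intro res; rfl
  | cons p t ih => intro res; simp only [writeAll, List.foldl_cons] at *; rw [ih, pySetAt, List.length_set]

theorem writeAll_get?_of_not_mem (l : List (Int × String)) (i : Nat)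
    (h : ∀ p ∈ l, p.1.toNat ≠ i) : ∀ res, (writeAll l res)[i]? = res[i]? := by
  induction l with
  | nil => intro res; rfl
  | cons p t ih =>
    intro res
    simp only [writeAll, List.foldl_cons] at *
    rw [ih (fun q hq => h q (List.mem_cons_of_mem _ hq)), pySetAt,
      List.getElem?_set_ne (h p (List.mem_cons_self))]

theorem writeAll_get?_of_mem (l : List (Int × String)) (i : Nat) (v : String)
    (hnd : (l.map (fun p => p.1)).Nodup) (h0 : ∀ p ∈ l, 0 ≤ p.1) :
    ∀ res, ((i : Int), v) ∈ l → i < res.length → (writeAll l res)[i]? = some v := by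
  induction l with
  | nil => intro res hmem _; simp at hmem
  | cons p t ih =>
    intro res hmem hlen
    rcases List.mem_cons.mp hmem with heq | hmemt
    · subst heq
      show (writeAll t (pySetAt res (i : Int) v))[i]? = some v
      have htail : ∀ q ∈ t, q.1.toNat ≠ i := by
        intro q hq hcon
        have hne : q.1 ≠ (i : Int) := by
          intro he
          have : (i : Int) ∈ t.map (fun p => p.1) := by
            rw [← he]; exact List.mem_map_of_mem hq
          simp only [List.map_cons, List.nodup_cons] at hnd
          exact hnd.1 this
        apply hne
        have := h0 q (List.mem_cons_of_mem _ hq)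
        omega
      rw [writeAll_get?_of_not_mem t i htail]
      simp only [pySetAt, Int.toNat_natCast]
      exact List.getElem?_set_self hlen
    · have hnd' : (t.map (fun p => p.1)).Nodup := by
        simp only [List.map_cons, List.nodup_cons] at hnd; exact hnd.2
      have h0' : ∀ q ∈ t, 0 ≤ q.1 := fun q hq => h0 q (List.mem_cons_of_mem _ hq)
      show (writeAll t (pySetAt res p.1 p.2))[i]? = some v
      exact ih hnd' h0' _ hmemt (by rw [pySetAt, List.length_set]; exact hlen)

theorem fillStep_eq (g : String × List Int) (res : List String) :
    fillStep res g = writeAll (writesOf g) res := by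
  rcases g with ⟨k, ps⟩
  match ps with
  | [] => rfl
  | [p] => rfl
  | a :: b :: t =>
    simp only [fillStep, writesOf, writeAll, List.foldl_map, pySetAt]

theorem fillFold (items : List (String × List Int)) :
    ∀ res, items.foldl fillStep res = writeAll (items.flatMap writesOf) res := by
  induction items with
  | nil => intro res; rfl
  | cons g t ih =>
    intro res
    rw [List.foldl_cons, ih, List.flatMap_cons]
    have happ : writeAll (writesOf g ++ List.flatMap writesOf t) res
        = writeAll (List.flatMap writesOf t) (writeAll (writesOf g) res) := by
      simp only [writeAll, List.foldl_append]
    rw [happ, fillStep_eq]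

theorem mem_posOf (raw : List String) (k : String) (p : Int) :
    p ∈ posOf raw k ↔ ∃ (j : Nat) (hj : j < raw.length), p = (j : Int) ∧ raw[j] = k := by
  simp only [posOf, List.mem_map, List.mem_filter, PySem.List.mem_enumerate_iff]
  constructor
  · rintro ⟨q, ⟨⟨j, hj, rfl⟩, hqk⟩, rfl⟩
    simp only [beq_iff_eq] at hqk
    exact ⟨j, hj, by simp, hqk⟩
  · rintro ⟨j, hj, rfl, hk⟩
    exact ⟨((j : Int), k), ⟨⟨j, hj, by simp [hk]⟩, by simp⟩, rfl⟩

theorem posOf_length (raw : List String) (k : String) : (posOf raw k).length = raw.count k := by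
  simp only [posOf, List.length_map]
  rw [← List.countP_eq_length_filter]
  conv_rhs => rw [← PySem.List.map_snd_enumerate raw 0]
  rw [List.count_eq_countP, List.countP_map]
  rfl

theorem posAux_get? :
    ∀ (raw : List String) (k : String) (s : Int) (i : Nat) (hi : i < raw.length), raw[i] = k →
    (((PySem.List.enumerate raw s).filter (fun p => p.2 == k)).map (fun p => p.1))[(raw.take i).count k]? = some (s + i) := by
  intro raw
  induction raw with
  | nil => intro k s i hi _; simp at hi
  | cons x t ih =>
    intro k s i hi hk
    rw [PySem.List.enumerate_cons]
    cases i with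
    | zero =>
      have hx : x = k := hk
      subst hx
      simp
    | succ j =>
      have hj : j < t.length := by simpa using Nat.lt_of_succ_lt_succ hi
      have hkj : t[j] = k := hk
      have := ih k (s + 1) j hj hkj
      by_cases hx : x = k
      · subst hx
        rw [List.filter_cons]
        simp only [beq_self_eq_true, if_pos]
        have hcnt : ((x :: t).take (j + 1)).count x = (t.take j).count x + 1 := by
          simp
        rw [hcnt]
        simp only [List.map_cons, List.getElem?_cons_succ]
        rw [this]
        congr 1
        push_cast
        ring
      · rw [List.filter_cons]
        have hbeq : (x == k) = false := by simp [hx]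
        rw [hbeq]
        simp only [Bool.false_eq_true, if_false]
        have hcnt : ((x :: t).take (j + 1)).count k = (t.take j).count k := by
          simp [hx]
        rw [hcnt, this]
        congr 1
        push_cast
        ring

theorem posOf_get? (raw : List String) (k : String) (i : Nat) (hi : i < raw.length) (hk : raw[i] = k) :
    (posOf raw k)[(raw.take i).count k]? = some (i : Int) := by
  have := posAux_get? raw k 0 i hi hk
  simpa [posOf] using this

theorem groups_items (raw : List String) :
    PySem.Dict.items ((PySem.List.enumerate raw 0).foldl
      (fun d pl => PySem.Dict.modify d pl.2 [] (fun ps => ps ++ [pl.1])) PySem.Dict.empty)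
    = (PySem.Set.ofList raw).map (fun k => (k, posOf raw k)) := by
  have hkeys : ((PySem.List.enumerate raw 0).foldl
      (fun d pl => PySem.Dict.modify d pl.2 [] (fun ps => ps ++ [pl.1]))
      (PySem.Dict.empty : PySem.Dict String (List Int))).keys = PySem.Set.ofList raw := by
    rw [PySem.Dict.keys_foldl_modify_key (PySem.List.enumerate raw 0) (fun pl => pl.2) []
      (fun _ pl => fun ps => ps ++ [pl.1]) PySem.Dict.empty]
    rw [PySem.Dict.keys_empty, PySem.Set.update_nil_left, PySem.List.map_snd_enumerate]
  have hnd : ((PySem.List.enumerate raw 0).foldl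
      (fun d pl => PySem.Dict.modify d pl.2 [] (fun ps => ps ++ [pl.1]))
      (PySem.Dict.empty : PySem.Dict String (List Int))).keys.Nodup := by
    exact PySem.Dict.nodup_keys_foldl_modify_key _ _ _ _ _ PySem.Dict.nodup_keys_empty
  have hget : ∀ k, PySem.Dict.getD ((PySem.List.enumerate raw 0).foldl
      (fun d pl => PySem.Dict.modify d pl.2 [] (fun ps => ps ++ [pl.1]))
      (PySem.Dict.empty : PySem.Dict String (List Int))) k [] = posOf raw k := by
    intro k
    have hswap : (PySem.List.enumerate raw 0).foldl
        (fun d pl => PySem.Dict.modify d pl.2 [] (fun ps => ps ++ [pl.1]))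
        (PySem.Dict.empty : PySem.Dict String (List Int))
      = ((PySem.List.enumerate raw 0).map (fun pl => (pl.2, pl.1))).foldl
        (fun d p => PySem.Dict.modify d p.1 [] (fun ps => ps ++ [p.2])) PySem.Dict.empty := by
      rw [List.foldl_map]
    rw [hswap, PySem.Dict.getD_foldl_modify_append, PySem.Dict.getD_empty]
    rw [List.filter_map, List.map_map]
    simp only [posOf]
    rfl
  rw [PySem.Dict.items_eq_map_keys _ hnd [], hkeys]
  exact List.map_congr_left (fun k _ => by rw [hget k])

theorem writesOf_keys (g : String × List Int) : (writesOf g).map (fun p => p.1) = g.2 := by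
  rcases g with ⟨k, ps⟩
  match ps with
  | [] => rfl
  | [p] => rfl
  | a :: b :: t =>
    simp only [writesOf, List.map_map]
    exact PySem.List.map_snd_enumerate _ 0

theorem nodup_posOf (raw : List String) (k : String) : (posOf raw k).Nodup := by
  have hpw : ((PySem.List.enumerate raw 0).filter (fun p => p.2 == k)).Pairwise (fun p q => p.1 < q.1) :=
    (PySem.List.pairwise_lt_enumerate raw 0).filter _
  have : (posOf raw k).Pairwise (· < ·) := List.Pairwise.map _ (fun _ _ h => h) hpw
  exact this.imp (fun h => ne_of_lt h)

theorem nodup_flat (raw : List String) :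
    ∀ (ks : List String), ks.Nodup → (ks.flatMap (posOf raw)).Nodup := by
  intro ks
  induction ks with
  | nil => intro _; simp
  | cons k t ih =>
    intro hnd
    rw [List.flatMap_cons]
    rcases List.nodup_cons.mp hnd with ⟨hk, ht⟩
    refine List.Nodup.append (nodup_posOf raw k) (ih ht) ?_
    intro p hp hpt
    rcases (mem_posOf raw k p).mp hp with ⟨j, hj, rfl, hjk⟩
    rcases List.mem_flatMap.mp hpt with ⟨k', hk', hpk'⟩
    rcases (mem_posOf raw k' _).mp hpk' with ⟨j', hj', hje, hjk'⟩
    have : j' = j := by exact_mod_cast hje.symm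
    subst this
    rw [hjk] at hjk'
    subst hjk'
    exact hk hk'

-- ===== VERDICT (by name: the statement is the Claim_ definition above) =====
theorem unique_labels_py_spec : Claim_equal_unique_labels_py := by
  intro rows _
  unfold Spec_unique_labels_py
  have hB : unique_labels_py_alt rows
      = writeAll (((PySem.Set.ofList (rows.map runLabel)).map
          (fun k => (k, posOf (rows.map runLabel) k))).flatMap writesOf)
        (PySem.List.pyRepeat [""] (PySem.List.len (rows.map runLabel))) := by
    have h1 : unique_labels_py_alt rows
        = (PySem.Dict.items ((PySem.List.enumerate (rows.map runLabel) 0).foldl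
            (fun d pl => PySem.Dict.modify d pl.2 [] (fun ps => ps ++ [pl.1])) PySem.Dict.empty)).foldl
          fillStep (PySem.List.pyRepeat [""] (PySem.List.len (rows.map runLabel))) := rfl
    rw [h1, groups_items, fillFold]
  rw [A_eq_canon, hB]
  set raw := rows.map runLabel with hraw
  set W := ((PySem.Set.ofList raw).map (fun k => (k, posOf raw k))).flatMap writesOf with hW
  have hR0 : (PySem.List.pyRepeat [""] (PySem.List.len raw)).length = raw.length := by
    rw [PySem.List.pyRepeat_singleton]
    simp [PySem.List.len]
  have hWkeys : W.map (fun p => p.1) = (PySem.Set.ofList raw).flatMap (posOf raw) := by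
    rw [hW, List.map_flatMap]
    rw [List.flatMap_map]
    simp only [writesOf_keys]
  have hWnd : (W.map (fun p => p.1)).Nodup := by
    rw [hWkeys]; exact nodup_flat raw _ (PySem.Set.nodup_ofList raw)
  have hW0 : ∀ p ∈ W, 0 ≤ p.1 := by
    intro p hp
    have : p.1 ∈ W.map (fun p => p.1) := List.mem_map_of_mem hp
    rw [hWkeys] at this
    rcases List.mem_flatMap.mp this with ⟨k, _, hpk⟩
    rcases (mem_posOf raw k _).mp hpk with ⟨j, _, hje, _⟩
    rw [hje]; exact Int.natCast_nonneg j
  apply List.ext_getElem?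
  intro i
  by_cases hi : i < raw.length
  · have hA : (canonAux raw [] raw)[i]? = some (outAt raw i) := by
      have := canonAux_get? raw raw [] i (by simp) hi
      simpa using this
    have hmemW : ((i : Int), outAt raw i) ∈ W := by
      have hkmem : raw[i] ∈ PySem.Set.ofList raw :=
        (PySem.Set.mem_ofList raw _).mpr (List.getElem_mem hi)
      have hgmem : (raw[i], posOf raw raw[i]) ∈ (PySem.Set.ofList raw).map (fun k => (k, posOf raw k)) :=
        List.mem_map_of_mem hkmem
      have hpc := posOf_get? raw raw[i] i hi rfl
      have hcnt1 : 1 ≤ raw.count raw[i] := List.count_pos_iff.mpr (List.getElem_mem hi)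
      have hout : outAt raw i = (if 1 < raw.count raw[i] then
          raw[i] ++ " (#" ++ PySem.Int.toStr (((raw.take i).count raw[i] : Int) + 1) ++ ")" else raw[i]) := by
        simp [outAt, List.getD_eq_getElem?_getD, List.getElem?_eq_getElem hi]
      rcases Nat.lt_or_ge 1 (raw.count raw[i]) with hgt | hle
      · -- duplicated label: second branch of writesOf
        have hlen2 : 2 ≤ (posOf raw raw[i]).length := by rw [posOf_length]; omega
        refine List.mem_flatMap.mpr ⟨(raw[i], posOf raw raw[i]), hgmem, ?_⟩
        match hps : posOf raw raw[i] with
        | [] => rw [hps] at hlen2; simp at hlen2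
        | [q] => rw [hps] at hlen2; simp at hlen2
        | a :: b :: t =>
          rw [hps] at hpc
          have henum : (PySem.List.enumerate (a :: b :: t) 0)[(raw.take i).count raw[i]]?
              = some ((0 : Int) + ((raw.take i).count raw[i] : Int), (i : Int)) := by
            rw [PySem.List.getElem?_enumerate, hpc]
            rfl
          have hmem := List.mem_of_getElem? henum
          refine List.mem_map.mpr ⟨_, hmem, ?_⟩
          rw [hout, if_pos hgt]
          simp
      · -- unique label: singleton branch of writesOf
        have hcnt : raw.count raw[i] = 1 := le_antisymm hle hcnt1
        have hlen1 : (posOf raw raw[i]).length = 1 := by rw [posOf_length, hcnt]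
        rcases List.length_eq_one_iff.mp hlen1 with ⟨q, hq⟩
        rw [hq] at hpc
        have hc0 : (raw.take i).count raw[i] = 0 := by
          by_contra h
          have h1 : 1 ≤ (raw.take i).count raw[i] := Nat.one_le_iff_ne_zero.mpr h
          have hnone : ([q] : List Int)[(raw.take i).count raw[i]]? = none :=
            List.getElem?_eq_none (by simpa using h1)
          rw [hnone] at hpc
          exact Option.some_ne_none _ hpc.symm
        rw [hc0] at hpc
        simp only [List.getElem?_cons_zero, Option.some.injEq] at hpc
        refine List.mem_flatMap.mpr ⟨(raw[i], posOf raw raw[i]), hgmem, ?_⟩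
        rw [hq, hpc]
        have : outAt raw i = raw[i] := by
          rw [hout, if_neg (by omega)]
        rw [this]
        simp [writesOf]
    rw [hA]
    exact (writeAll_get?_of_mem W i (outAt raw i) hWnd hW0 _ hmemW (by rw [hR0]; exact hi)).symm
  · rw [List.getElem?_eq_none, List.getElem?_eq_none]
    · rw [writeAll_length, hR0]; omega
    · rw [canonAux_length]; omega
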